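-- pv_equiv track=rewrite | github.com/carolhanna01/binary2name | gnu_dataset/solfege-3.8.2/mpd/mpdutils.py | key_to_accidentals
-- ===== SOURCE A (Python) =====
-- def key_to_accidentals(key):
--     i = ['aeses', 'eeses', 'beses', 'fes', 'ces', 'ges', 'des', 'aes',
--          'ees', 'bes', 'f', 'c', 'g', 'd', 'a', 'e', 'b', 'fis', 'cis',
--          'gis', 'dis', 'ais', 'eis', 'bis'].index(key[0])-11
--     if key[1] == 'minor':
--         i = i - 3
--     if i > 0:
--         r = ['fis', 'cis', 'gis', 'dis', 'ais', 'eis',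
--              'bis', 'fis', 'cis', 'gis', 'dis'][:i]
--         m = 'is'
--     elif i < 0:
--         r = ['bes', 'ees', 'aes', 'des', 'ges', 'ces',
--              'fes', 'bes', 'ees', 'aes', 'des'][:-i]
--         m = 'es'
--     else:
--         r = []
--     retval = []
--     for a in r:
--         if a not in retval:
--             retval.append(a)
--         else:
--             del retval[retval.index(a)]
--             retval.append(a+m)
--     return retval
-- ===== SOURCE B (Python) =====
-- def key_to_accidentals(key):
--     tonics = ['aeses', 'eeses', 'beses', 'fes', 'ces', 'ges', 'des', 'aes',
--               'ees', 'bes', 'f', 'c', 'g', 'd', 'a', 'e', 'b', 'fis', 'cis',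
--               'gis', 'dis', 'ais', 'eis', 'bis']
--     i = tonics.index(key[0]) - 11
--     if key[1] == 'minor':
--         i -= 3
--     if i > 0:
--         cycle = ['fis', 'cis', 'gis', 'dis', 'ais', 'eis', 'bis']
--         m = 'is'
--         n = min(i, 11)
--     elif i < 0:
--         cycle = ['bes', 'ees', 'aes', 'des', 'ges', 'ces', 'fes']
--         m = 'es'
--         n = min(-i, 11)
--     else:
--         return []
--     d = max(n - 7, 0)
--     return cycle[d:n] + [c + m for c in cycle[:d]]
-- ===== Notes on version B (the rewrite author's own statement) =====
-- stated objective: simpler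
-- what changed: B drops A's 11-element repeated-cycle slice and the del/reindex/append mutation loop, computing the result in closed form from the 7-note cycle: singles cycle[d:n] in order followed by the doubled bases cycle[:d] with the suffix appended (d = max(n-7,0)).
-- outside the precondition, e.g. on key_to_accidentals(('x', 'major')): A raises ValueError, B raises ValueError
import Mathlib
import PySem

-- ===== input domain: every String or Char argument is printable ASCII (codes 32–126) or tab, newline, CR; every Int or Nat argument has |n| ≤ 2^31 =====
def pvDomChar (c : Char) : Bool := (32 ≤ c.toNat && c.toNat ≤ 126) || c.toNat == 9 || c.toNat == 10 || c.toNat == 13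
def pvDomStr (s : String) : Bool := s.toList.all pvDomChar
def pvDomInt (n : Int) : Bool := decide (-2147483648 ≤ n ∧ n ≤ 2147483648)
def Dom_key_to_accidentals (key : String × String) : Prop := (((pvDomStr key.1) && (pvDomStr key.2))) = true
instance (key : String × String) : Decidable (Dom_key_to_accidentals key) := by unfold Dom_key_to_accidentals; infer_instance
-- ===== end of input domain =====

-- B replaces A's del/append mutation loop by a closed-form slice construction
-- (singles of the cycle in order, then doubled bases with the suffix), for simplicity.

-- ===== PORT A =====
def pvTonics : List String :=
  ["aeses", "eeses", "beses", "fes", "ces", "ges", "des", "aes",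
   "ees", "bes", "f", "c", "g", "d", "a", "e", "b", "fis", "cis",
   "gis", "dis", "ais", "eis", "bis"]

-- body of A's `for a in r:` loop (del retval[retval.index(a)] then append a+m)
def pvStepA (m : String) (retval : List String) (a : String) : List String :=
  if !(retval.contains a) then retval ++ [a]
  else
    match PySem.List.index? retval a with
    | some k => (retval.eraseIdx k) ++ [a ++ m]
    | none => retval  -- unreachable: a ∈ retval here

def key_to_accidentals (key : String × String) : List String :=
  match PySem.List.index? pvTonics key.1 with
  | none => []  -- Python raises ValueError here; excluded by Pre_
  | some idx =>
    let i0 : Int := (idx : Int) - 11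
    let i : Int := if key.2 == "minor" then i0 - 3 else i0
    let rm : List String × String :=
      if i > 0 then
        (PySem.List.slice ["fis", "cis", "gis", "dis", "ais", "eis",
                           "bis", "fis", "cis", "gis", "dis"] none (some i), "is")
      else if i < 0 then
        (PySem.List.slice ["bes", "ees", "aes", "des", "ges", "ces",
                           "fes", "bes", "ees", "aes", "des"] none (some (-i)), "es")
      else ([], "")
    rm.1.foldl (pvStepA rm.2) []

-- ===== PORT B =====
-- B's helper: singles cycle[d:n], then doubled bases cycle[:d] with suffix m
def pvBuildB (cycle : List String) (m : String) (n : Int) : List String :=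
  let d : Int := max (n - 7) 0
  PySem.List.slice cycle (some d) (some n)
    ++ (PySem.List.slice cycle none (some d)).map (fun c => c ++ m)

def key_to_accidentals_alt (key : String × String) : List String :=
  match PySem.List.index? ["aeses", "eeses", "beses", "fes", "ces", "ges", "des", "aes",
                           "ees", "bes", "f", "c", "g", "d", "a", "e", "b", "fis", "cis",
                           "gis", "dis", "ais", "eis", "bis"] key.1 with
  | none => []  -- unreachable under Pre_
  | some idx =>
    let i0 : Int := (idx : Int) - 11
    let i : Int := if key.2 == "minor" then i0 - 3 else i0
    if i > 0 then pvBuildB ["fis", "cis", "gis", "dis", "ais", "eis", "bis"] "is" (min i 11)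
    else if i < 0 then pvBuildB ["bes", "ees", "aes", "des", "ges", "ces", "fes"] "es" (min (-i) 11)
    else []

-- ===== PRECONDITION & SPEC =====
-- Pre_ excludes tonic names outside A's table, on which A's `.index` raises ValueError.
def Pre_key_to_accidentals (key : String × String) : Prop := key.1 ∈ pvTonics
instance (key : String × String) : Decidable (Pre_key_to_accidentals key) := by
  unfold Pre_key_to_accidentals; infer_instance

def pvWitness_key_to_accidentals : (String × String) := ("ees", "minor")

def Spec_key_to_accidentals (key : String × String) (out : List String) : Prop := out = key_to_accidentals_alt key
instance (key : String × String) (out : List String) : Decidable (Spec_key_to_accidentals key out) := by unfold Spec_key_to_accidentals; infer_instance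

-- ===== CLAIM (what is proved, stated in full; the proofs are below) =====
def Claim_equal_key_to_accidentals : Prop := ∀ (key : String × String), Dom_key_to_accidentals key → Pre_key_to_accidentals key → Spec_key_to_accidentals key (key_to_accidentals key)

-- ===== LEMMAS AND PROOFS =====

-- both ports read key.2 only through `key.2 == "minor"`
theorem pvA_mode (k1 k2 : String) :
    key_to_accidentals (k1, k2)
      = if k2 == "minor" then key_to_accidentals (k1, "minor")
        else key_to_accidentals (k1, "major") := by
  by_cases h : k2 == "minor" <;> simp [key_to_accidentals, h]

theorem pvB_mode (k1 k2 : String) :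
    key_to_accidentals_alt (k1, k2)
      = if k2 == "minor" then key_to_accidentals_alt (k1, "minor")
        else key_to_accidentals_alt (k1, "major") := by
  by_cases h : k2 == "minor" <;> simp [key_to_accidentals_alt, h]

-- ===== VERDICT (by name: the statement is the Claim_ definition above) =====
theorem key_to_accidentals_spec : Claim_equal_key_to_accidentals := by
  intro key _ hpre
  obtain ⟨k1, k2⟩ := key
  unfold Spec_key_to_accidentals
  rw [pvA_mode, pvB_mode]
  simp only [Pre_key_to_accidentals, pvTonics, List.mem_cons, List.not_mem_nil, or_false] at hpre
  rcases hpre with rfl|rfl|rfl|rfl|rfl|rfl|rfl|rfl|rfl|rfl|rfl|rfl|rfl|rfl|rfl|rfl|rfl|rfl|rfl|rfl|rfl|rfl|rfl|rfl <;>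
    by_cases h : k2 == "minor" <;> simp only [h, reduceIte] <;> decide
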